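-- pv_equiv track=rewrite | github.com/beppvis/DSA | hello.py | highWindow
-- ===== SOURCE A (Python) =====
-- def highWindow(A):
--     l1 = len(A)
--     max_size = 0
--     size = 0
--     if (l1<=1): return l1
--
--     for i in range(0,l1-1):
--         size = size+1
--         if A[i]>=A[i+1]:
--             max_size = max(max_size,size)
--             size=0
--
--     return max_size
-- ===== SOURCE B (Python) =====
-- def highWindow(A):
--     n = len(A)
--     if n <= 1:
--         return n
--     drops = [-1] + [i for i in range(n - 1) if A[i] >= A[i + 1]]
--     if len(drops) < 2:
--         return 0
--     return max(b - a for a, b in zip(drops, drops[1:]))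
-- ===== Notes on version B (the rewrite author's own statement) =====
-- stated objective: alternative
-- what changed: Instead of carrying a running size/max pair through one loop, B collects the drop positions (i with A[i]>=A[i+1]) into a list with a -1 sentinel and returns the maximum gap between consecutive drops (0 if there is no drop), reproducing A's value including ignoring the trailing increasing run.
import Mathlib
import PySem

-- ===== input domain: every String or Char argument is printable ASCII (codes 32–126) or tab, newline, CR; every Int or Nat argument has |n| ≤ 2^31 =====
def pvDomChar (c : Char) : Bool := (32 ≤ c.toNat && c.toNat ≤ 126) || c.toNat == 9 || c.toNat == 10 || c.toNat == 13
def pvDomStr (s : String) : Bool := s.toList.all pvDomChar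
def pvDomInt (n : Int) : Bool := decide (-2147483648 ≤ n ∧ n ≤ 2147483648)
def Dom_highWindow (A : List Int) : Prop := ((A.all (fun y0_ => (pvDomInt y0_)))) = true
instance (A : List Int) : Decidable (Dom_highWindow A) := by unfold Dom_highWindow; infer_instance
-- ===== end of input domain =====

-- B replaces A's running size/max loop state by a drop-position list with a -1 sentinel
-- and takes the maximum gap between consecutive drops (alternative decomposition, same cost).

-- ===== PORT A =====
def highWindow (A : List Int) : Int :=
  let l1 : Int := A.length
  if l1 ≤ 1 then l1
  else
    let st := (PySem.List.pyRange 0 (l1 - 1) 1).foldl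
      (fun (s : Int × Int) i =>
        let size := s.2 + 1
        if (PySem.List.pyGet? A i).getD 0 ≥ (PySem.List.pyGet? A (i + 1)).getD 0 then
          (max s.1 size, 0)
        else (s.1, size)) (0, 0)
    st.1

-- ===== PORT B =====
def highWindow_alt (A : List Int) : Int :=
  let n : Int := A.length
  if n ≤ 1 then n
  else
    let drops : List Int := (-1) ::
      ((PySem.List.pyRange 0 (n - 1) 1).filter
        (fun i => decide ((PySem.List.pyGet? A i).getD 0 ≥ (PySem.List.pyGet? A (i + 1)).getD 0)))
    if drops.length < 2 then 0
    else (PySem.List.max? (List.zipWith (fun a b => b - a) drops (drops.drop 1)) (fun y => y)).getD 0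

-- ===== PRECONDITION & SPEC =====
def Spec_highWindow (A : List Int) (out : Int) : Prop := out = highWindow_alt A
instance (A : List Int) (out : Int) : Decidable (Spec_highWindow A out) := by unfold Spec_highWindow; infer_instance

-- ===== CLAIM (what is proved, stated in full; the proofs are below) =====
def Claim_equal_highWindow : Prop := ∀ (A : List Int), Dom_highWindow A → Spec_highWindow A (highWindow A)

-- ===== LEMMAS AND PROOFS =====

-- A's loop body, abstracted over the drop predicate
def pvStep (p : Int → Bool) (s : Int × Int) (i : Int) : Int × Int :=
  let size := s.2 + 1
  if p i then (max s.1 size, 0) else (s.1, size)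

-- lengths of the increasing segments ended by a drop (trailing run omitted, as in A)
def pvSegs (p : Int → Bool) : Int → List Int → List Int
  | _, [] => []
  | s, i :: L => if p i then (s + 1) :: pvSegs p 0 L else pvSegs p (s + 1) L

-- consecutive differences against a moving previous value
def pvDiffs : Int → List Int → List Int
  | _, [] => []
  | prev, x :: xs => (x - prev) :: pvDiffs x xs

theorem pvStep_fold (p : Int → Bool) (L : List Int) :
    ∀ m s : Int, (L.foldl (pvStep p) (m, s)).1 = (pvSegs p s L).foldl max m := by
  induction L with
  | nil => intro m s; simp [pvSegs]
  | cons i L ih =>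
    intro m s
    by_cases h : p i <;> simp [pvStep, pvSegs, h, ih]

theorem pvZip_diffs (xs : List Int) :
    ∀ x : Int, List.zipWith (fun a b => b - a) (x :: xs) xs = pvDiffs x xs := by
  induction xs with
  | nil => intro x; simp [pvDiffs]
  | cons y ys ih => intro x; simp [pvDiffs, ih y]

theorem pvSegs_range (p : Int → Bool) (k : Nat) :
    ∀ t s : Int,
      pvSegs p s (PySem.List.pyRange t (t + k) 1)
        = pvDiffs (t - 1 - s) ((PySem.List.pyRange t (t + k) 1).filter p) := by
  induction k with
  | zero =>
    intro t s
    rw [PySem.List.pyRange_one_eq_nil (by simp)]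
    simp [pvSegs, pvDiffs]
  | succ k ih =>
    intro t s
    have hc : t < t + ((k : Nat) + 1 : Nat) := by push_cast; omega
    rw [PySem.List.pyRange_one_cons hc]
    have he : (t + ((k : Nat) + 1 : Nat) : Int) = (t + 1) + (k : Nat) := by push_cast; ring
    rw [he]
    by_cases h : p t
    · simp only [pvSegs, List.filter_cons, h, if_true, pvDiffs]
      rw [ih (t + 1) 0]
      congr 1
      · ring
      · congr 1; ring
    · simp only [pvSegs, List.filter_cons, h, if_neg, Bool.false_eq_true, not_false_iff]
      rw [ih (t + 1) (s + 1)]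
      congr 1
      ring

theorem pvSegs_pos (p : Int → Bool) (L : List Int) :
    ∀ s : Int, 0 ≤ s → ∀ x ∈ pvSegs p s L, 1 ≤ x := by
  induction L with
  | nil => intro s _ x hx; simp [pvSegs] at hx
  | cons i L ih =>
    intro s hs x hx
    by_cases h : p i
    · simp [pvSegs, h] at hx
      rcases hx with hx | hx
      · omega
      · exact ih 0 le_rfl x hx
    · simp [pvSegs, h] at hx
      exact ih (s + 1) (by omega) x hx

theorem pvFoldMax_eq_max? (l : List Int) (hl : ∀ x ∈ l, 1 ≤ x) :
    l.foldl max 0 = (PySem.List.max? l (fun y => y)).getD 0 := by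
  cases l with
  | nil => simp [PySem.List.max?]
  | cons x t =>
    rw [PySem.List.max?_id_cons]
    have hx : max 0 x = x := by
      have := hl x (by simp); omega
    simp [List.foldl, hx]

-- ===== VERDICT (by name: the statement is the Claim_ definition above) =====
theorem highWindow_spec : Claim_equal_highWindow := by
  intro A _
  unfold Spec_highWindow highWindow highWindow_alt
  by_cases h1 : (A.length : Int) ≤ 1
  · simp [h1]
  · simp only [h1, if_false]
    set p : Int → Bool :=
      fun i => decide ((PySem.List.pyGet? A i).getD 0 ≥ (PySem.List.pyGet? A (i + 1)).getD 0)
      with hp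
    have hbody :
        (fun (s : Int × Int) (i : Int) =>
          let size := s.2 + 1
          if (PySem.List.pyGet? A i).getD 0 ≥ (PySem.List.pyGet? A (i + 1)).getD 0 then
            (max s.1 size, 0)
          else (s.1, size)) = pvStep p := by
      funext s i
      by_cases hc : (PySem.List.pyGet? A i).getD 0 ≥ (PySem.List.pyGet? A (i + 1)).getD 0 <;>
        simp [pvStep, hp, hc]
    rw [hbody, pvStep_fold p _ 0 0]
    have hk : ((A.length : Int) - 1) = (0 : Int) + ((A.length - 1 : Nat) : Nat) := by
      omega
    rw [hk, pvSegs_range p (A.length - 1) 0 0]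
    set f := (PySem.List.pyRange 0 ((0 : Int) + ((A.length - 1 : Nat) : Nat)) 1).filter p with hf
    cases hfe : f with
    | nil =>
      simp [pvDiffs]
    | cons x xs =>
      rw [if_neg (by simp)]
      rw [List.drop_one, List.tail_cons, pvZip_diffs (x :: xs) (-1)]
      have hdiffeq : pvDiffs (0 - 1 - 0) (x :: xs) = pvDiffs (-1) (x :: xs) := by norm_num
      rw [hdiffeq]
      apply pvFoldMax_eq_max?
      intro y hy
      have := pvSegs_pos p (PySem.List.pyRange 0 ((0 : Int) + ((A.length - 1 : Nat) : Nat)) 1) 0 le_rfl y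
      rw [pvSegs_range p (A.length - 1) 0 0] at this
      rw [← hf, hfe] at this
      exact this (by simpa using hy)
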